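-- pv_equiv track=rewrite | github.com/JMVCoelho/PRI_project | PRI_P2_G22 [ ]/Ex4/exercise_4.py | candidates_as_ranks
-- ===== SOURCE A (Python) =====
-- def candidates_as_ranks(features, candidates):
--     result = dict()
--     #get ranks from the measures and compute result:
--
--     for candidate in candidates:
--         result[candidate[1]] = []
--         for feature in features:
--             for candidate_score in feature:
--                 if candidate_score[0] == candidate[1]:
--                     rank = feature.index(candidate_score) +1
--                     result[candidate[1]].append(rank)
--
--     return result
-- ===== SOURCE B (Python) =====
-- def _first_index(feature):
--     # first occurrence index of each (id, score) pair, one pass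
--     first = {}
--     for i, pair in enumerate(feature):
--         if pair not in first:
--             first[pair] = i
--     return first
--
-- def _feature_ranks(feature):
--     # id -> list of ranks of its occurrences in this feature, one pass
--     first = _first_index(feature)
--     ranks = {}
--     for pair in feature:
--         ranks.setdefault(pair[0], []).append(first[pair] + 1)
--     return ranks
--
-- def candidates_as_ranks(features, candidates):
--     per_feature = [_feature_ranks(f) for f in features]
--     result = {}
--     for candidate in candidates:
--         cid = candidate[1]
--         result[cid] = [r for ranks in per_feature for r in ranks.get(cid, [])]
--     return result
-- ===== Notes on version B (the rewrite author's own statement) =====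
-- stated objective: faster
-- what changed: Instead of, for every candidate, scanning every feature entry and calling feature.index (a linear scan) for each match, B precomputes per feature in one pass a first-occurrence-index dict and an id->ranks dict, and each candidate's answer is assembled by plain dict lookups.
import Mathlib
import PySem

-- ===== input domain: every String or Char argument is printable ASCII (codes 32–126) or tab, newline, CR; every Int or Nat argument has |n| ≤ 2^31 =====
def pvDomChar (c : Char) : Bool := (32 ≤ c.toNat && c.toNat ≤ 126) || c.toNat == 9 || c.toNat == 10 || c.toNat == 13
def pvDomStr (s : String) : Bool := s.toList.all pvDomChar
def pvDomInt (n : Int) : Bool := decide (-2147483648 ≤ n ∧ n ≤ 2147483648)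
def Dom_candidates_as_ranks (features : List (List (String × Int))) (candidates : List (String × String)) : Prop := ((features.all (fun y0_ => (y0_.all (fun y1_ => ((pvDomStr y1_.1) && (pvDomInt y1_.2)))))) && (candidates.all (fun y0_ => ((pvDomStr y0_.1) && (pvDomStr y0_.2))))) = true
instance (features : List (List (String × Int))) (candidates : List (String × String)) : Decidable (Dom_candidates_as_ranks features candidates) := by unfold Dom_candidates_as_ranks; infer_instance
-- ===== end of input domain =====

-- B replaces A's per-candidate rescan of every feature (with a linear feature.index call per hit)
-- by per-feature dicts built in one pass, then per-candidate lookups: asymptotically faster, same result.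

-- ===== PORT A =====
-- result[candidate[1]].append(rank): the key is always present (inserted just above), so it is
-- Dict.modify; feature.index(candidate_score) always succeeds (candidate_score ∈ feature), so the
-- `.getD 0` default of index? is unreachable.
def candidates_as_ranks (features : List (List (String × Int))) (candidates : List (String × String)) : List (String × List Int) :=
  (candidates.foldl (fun result cand =>
      let result := result.insert cand.2 ([] : List Int)
      features.foldl (fun result feature =>
        feature.foldl (fun result cs =>
          if cs.1 == cand.2 then
            let rank : Int := (((PySem.List.index? feature cs).getD 0 : Nat) : Int) + 1
            result.modify cand.2 [] (fun l => l ++ [rank])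
          else result) result) result)
    PySem.Dict.empty).items

-- ===== PORT B =====
-- _first_index: one pass over enumerate(feature); 'if pair not in first: first[pair] = i'
def pvFirstIdx (feature : List (String × Int)) : PySem.Dict (String × Int) Int :=
  (PySem.List.enumerate feature).foldl
    (fun d ip => if d.contains ip.2 then d else d.insert ip.2 ip.1) PySem.Dict.empty

-- _feature_ranks: ranks.setdefault(pair[0], []).append(first[pair] + 1) is Dict.modify with default [];
-- first[pair] never raises (pair ∈ feature), so the `.getD _ 0` default is unreachable.
def pvFeatRanks (feature : List (String × Int)) : PySem.Dict String (List Int) :=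
  let first := pvFirstIdx feature
  feature.foldl (fun rk p => rk.modify p.1 [] (fun l => l ++ [first.getD p 0 + 1])) PySem.Dict.empty

def candidates_as_ranks_alt (features : List (List (String × Int))) (candidates : List (String × String)) : List (String × List Int) :=
  let perFeature := features.map pvFeatRanks
  (candidates.foldl (fun result cand =>
      result.insert cand.2 ((perFeature.map (fun ranks => ranks.getD cand.2 [])).flatten))
    PySem.Dict.empty).items

-- ===== PRECONDITION & SPEC =====
def Spec_candidates_as_ranks (features : List (List (String × Int))) (candidates : List (String × String)) (out : List (String × List Int)) : Prop := out = candidates_as_ranks_alt features candidates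
instance (features : List (List (String × Int))) (candidates : List (String × String)) (out : List (String × List Int)) : Decidable (Spec_candidates_as_ranks features candidates out) := by unfold Spec_candidates_as_ranks; infer_instance

-- ===== CLAIM (what is proved, stated in full; the proofs are below) =====
def Claim_equal_candidates_as_ranks : Prop := ∀ (features : List (List (String × Int))) (candidates : List (String × String)), Dom_candidates_as_ranks features candidates → Spec_candidates_as_ranks features candidates (candidates_as_ranks features candidates)

-- ===== LEMMAS AND PROOFS =====

-- the ranks A's inner two loops collect for id `cid` from one feature
def pvRanksOf (feature : List (String × Int)) (cid : String) : List Int :=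
  (feature.filter (fun cs => cs.1 == cid)).map
    (fun cs => (((PySem.List.index? feature cs).getD 0 : Nat) : Int) + 1)

-- the first-occurrence fold of pvFirstIdx, characterised
lemma pvFirstIdx_fold (f : List (String × Int)) : ∀ (j : Int) (d : PySem.Dict (String × Int) Int)
    (p : String × Int),
    ((PySem.List.enumerate f j).foldl
        (fun d ip => if d.contains ip.2 then d else d.insert ip.2 ip.1) d).get? p =
      if d.contains p then d.get? p
      else (PySem.List.index? f p).map (fun i => j + (i : Int)) := by
  induction f with
  | nil =>
    intro j d p
    simp [PySem.List.enumerate_nil, PySem.List.index?_eq_idxOf?]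
    intro h
    rwa [← PySem.Dict.get?_eq_none_iff_contains] at h
  | cons q t ih =>
    intro j d p
    rw [PySem.List.enumerate_cons, List.foldl_cons]
    by_cases hq : d.contains q
    · simp only [hq, if_true]
      rw [ih (j + 1) d p]
      by_cases hp : d.contains p
      · simp [hp]
      · simp only [hp]
        have hqp : q ≠ p := fun h => hp (h ▸ hq)
        rw [PySem.List.index?_cons_of_ne _ hqp]
        rcases hidx : PySem.List.index? t p with _ | i
        · simp
        · simp
          ring
    · rw [if_neg hq, ih (j + 1) (d.insert q j) p]
      by_cases hqp : q = p
      · subst hqp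
        simp [PySem.Dict.contains_insert_self, PySem.Dict.get?_insert_self, hq,
          List.idxOf?_cons]
      · rw [PySem.Dict.contains_insert, PySem.Dict.get?_insert_of_ne _ _ (Ne.symm hqp)]
        have : (p == q) = false := by simp [Ne.symm hqp]
        rw [this]
        simp only [Bool.false_or]
        by_cases hp : d.contains p
        · simp [hp]
        · simp only [hp]
          rw [PySem.List.index?_cons_of_ne _ hqp]
          rcases hidx : PySem.List.index? t p with _ | i
          · simp
          · simp
            ring

lemma pvFirstIdx_getD (f : List (String × Int)) (p : String × Int) (hp : p ∈ f) :
    (pvFirstIdx f).getD p 0 = (((PySem.List.index? f p).getD 0 : Nat) : Int) := by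
  rcases hidx : PySem.List.index? f p with _ | i
  · rw [PySem.List.index?_eq_idxOf?] at hidx
    simp [List.idxOf?_eq_none_iff] at hidx
    exact absurd hp hidx
  · rw [PySem.Dict.getD_eq_get?_getD, pvFirstIdx, pvFirstIdx_fold f 0 PySem.Dict.empty p]
    rw [PySem.List.index?_eq_idxOf?] at hidx
    simp [hidx]

-- repeated append-modify at one fixed key collapses to a single insert
lemma pvModRep {α : Type} (g : α → Int) (k : String) :
    ∀ (L : List α) (d : PySem.Dict String (List Int)) (v : List Int),
    L.foldl (fun d x => d.modify k [] (fun l => l ++ [g x])) (d.insert k v) =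
      d.insert k (v ++ L.map g) := by
  intro L
  induction L with
  | nil => intro d v; simp
  | cons a t ih =>
    intro d v
    rw [List.foldl_cons]
    have hstep : (d.insert k v).modify k [] (fun l => l ++ [g a]) = d.insert k (v ++ [g a]) := by
      show (d.insert k v).insert k ((d.insert k v).getD k [] ++ [g a]) = _
      rw [PySem.Dict.getD_insert_self, PySem.Dict.insert_insert_self]
    rw [hstep, ih d (v ++ [g a])]
    simp

-- A's inner two loops, per feature, starting from a dict whose entry at cid is v
lemma pvFeatStep (feature : List (String × Int)) (cid : String)
    (d : PySem.Dict String (List Int)) (v : List Int) :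
    feature.foldl (fun result cs =>
        if cs.1 == cid then
          result.modify cid []
            (fun l => l ++ [(((PySem.List.index? feature cs).getD 0 : Nat) : Int) + 1])
        else result) (d.insert cid v) =
      d.insert cid (v ++ pvRanksOf feature cid) := by
  rw [PySem.List.foldl_if_eq_foldl_filter, pvModRep, pvRanksOf]

lemma pvFeatures (fs : List (List (String × Int))) (cid : String) :
    ∀ (d : PySem.Dict String (List Int)) (v : List Int),
    fs.foldl (fun result feature =>
        feature.foldl (fun result cs =>
          if cs.1 == cid then
            result.modify cid []
              (fun l => l ++ [(((PySem.List.index? feature cs).getD 0 : Nat) : Int) + 1])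
          else result) result) (d.insert cid v) =
      d.insert cid (v ++ (fs.map (fun f => pvRanksOf f cid)).flatten) := by
  induction fs with
  | nil => intro d v; simp
  | cons f t ih =>
    intro d v
    rw [List.foldl_cons, pvFeatStep f cid d v, ih d (v ++ pvRanksOf f cid)]
    simp

-- B's per-feature dict looks up to exactly A's per-feature ranks
lemma pvFeatRanks_getD (feature : List (String × Int)) (cid : String) :
    (pvFeatRanks feature).getD cid [] = pvRanksOf feature cid := by
  show (feature.foldl
      (fun rk p => rk.modify p.1 [] (fun l => l ++ [(pvFirstIdx feature).getD p 0 + 1]))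
      PySem.Dict.empty).getD cid [] = _
  have hmap := List.foldl_map (f := fun p : String × Int => (p.1, (pvFirstIdx feature).getD p 0 + 1))
    (g := fun (rk : PySem.Dict String (List Int)) q => rk.modify q.1 [] (fun l => l ++ [q.2]))
    (l := feature) (init := PySem.Dict.empty)
  rw [← hmap]
  rw [PySem.Dict.getD_foldl_modify_append]
  rw [PySem.Dict.getD_empty, List.nil_append, List.filter_map, pvRanksOf, List.map_map]
  have hfilt : feature.filter ((fun q => q.1 == cid) ∘ (fun p => (p.1, (pvFirstIdx feature).getD p 0 + 1)))
      = feature.filter (fun cs => cs.1 == cid) := by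
    apply List.filter_congr; intro x _; rfl
  rw [hfilt]
  apply List.map_congr_left
  intro p hp
  have hpf : p ∈ feature := List.mem_of_mem_filter hp
  simp [Function.comp, pvFirstIdx_getD feature p hpf]

-- ===== VERDICT (by name: the statement is the Claim_ definition above) =====
theorem candidates_as_ranks_spec : Claim_equal_candidates_as_ranks := by
  intro features candidates _
  unfold Spec_candidates_as_ranks candidates_as_ranks candidates_as_ranks_alt
  congr 1
  apply PySem.List.foldl_congr_mem
  intro d cand _
  show features.foldl _ (d.insert cand.2 []) = _
  rw [pvFeatures features cand.2 d []]
  rw [List.nil_append, List.map_map]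
  refine congrArg _ (congrArg List.flatten (List.map_congr_left ?_))
  intro f _
  exact (pvFeatRanks_getD f cand.2).symm
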